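-- pv_equiv track=rewrite | github.com/nbht98/shell | command_substitution.py | check_substitution
-- ===== SOURCE A (Python) =====
-- def check_substitution(item):
--     substitution_syntax_1 = ['$', '(', ')']
--     substitution_syntax_2 = ['`', '`']
--     check_list_1 = []
--     check_list_2 = []
--     for char in item:
--         if char in substitution_syntax_1:
--             check_list_1.append(char)
--             if "".join(check_list_1) == "".join(substitution_syntax_1):
--                 return True
--         if char in substitution_syntax_2:
--             check_list_2.append(char)
--             if "".join(check_list_2) == "".join(substitution_syntax_2):
--                 return True
--     return False
-- ===== SOURCE B (Python) =====
-- def check_substitution(item):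
--     if item.count('`') >= 2:
--         return True
--     head, dollar, rest = item.partition('$')
--     if not dollar or '(' in head or ')' in head:
--         return False
--     mid, lpar, tail = rest.partition('(')
--     if not lpar or '$' in mid or ')' in mid:
--         return False
--     body, rpar, _ = tail.partition(')')
--     return bool(rpar) and '$' not in body and '(' not in body
-- ===== Notes on version B (the rewrite author's own statement) =====
-- stated objective: alternative
-- what changed: Replaced A's character-by-character scan with two running accumulator lists and repeated joins by a scan-free decomposition: partition the string at the first '$', '(' and ')' in turn and test the intervening segments for the other marker characters, plus a single backtick count.
import Mathlib
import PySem

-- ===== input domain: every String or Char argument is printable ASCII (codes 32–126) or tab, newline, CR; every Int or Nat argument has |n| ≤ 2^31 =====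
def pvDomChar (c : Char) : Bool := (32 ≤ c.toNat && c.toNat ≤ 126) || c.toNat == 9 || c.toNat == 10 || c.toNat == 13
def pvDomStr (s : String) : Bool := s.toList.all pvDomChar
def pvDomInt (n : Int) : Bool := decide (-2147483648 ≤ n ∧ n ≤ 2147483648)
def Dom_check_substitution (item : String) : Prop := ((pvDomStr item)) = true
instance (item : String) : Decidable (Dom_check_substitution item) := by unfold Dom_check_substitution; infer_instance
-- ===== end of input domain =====

-- B replaces A's per-character scan with accumulator lists by a scan-free decomposition:
-- partition at the first '$', '(' and ')' in turn, checking the segments between them,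
-- plus one backtick count; objective: alternative. Exact equivalence, no Pre_.

-- ===== PORT A =====
def aSyntax1 : List Char := ['$', '(', ')']
def aSyntax2 : List Char := ['`', '`']

-- the loop over `item`'s characters, carrying check_list_1 / check_list_2.
-- `"".join(xs) == "".join(ys)` on lists of single characters is list equality, ported as `=` on List Char.
def aLoop : List Char → List Char → List Char → Bool
  | [], _, _ => false
  | c :: rest, l1, l2 =>
    if aSyntax1.contains c then
      let l1' := l1 ++ [c]
      if l1' = aSyntax1 then true
      else if aSyntax2.contains c then
        let l2' := l2 ++ [c]
        if l2' = aSyntax2 then true else aLoop rest l1' l2'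
      else aLoop rest l1' l2
    else if aSyntax2.contains c then
      let l2' := l2 ++ [c]
      if l2' = aSyntax2 then true
      else aLoop rest l1 l2'
    else aLoop rest l1 l2

def check_substitution (item : String) : Bool := aLoop item.toList [] []

-- ===== PORT B =====
-- str.partition(c) for a single character, over List Char: (before, found?, after)
def bPartition (c : Char) (l : List Char) : List Char × Bool × List Char :=
  (l.takeWhile (fun x => x != c),
    match l.dropWhile (fun x => x != c) with
    | [] => (false, [])
    | _ :: r => (true, r))

def check_substitution_alt (item : String) : Bool :=
  if 2 ≤ item.toList.count '`' then true
  else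
    let p1 := bPartition '$' item.toList
    if !p1.2.1 || p1.1.contains '(' || p1.1.contains ')' then false
    else
      let p2 := bPartition '(' p1.2.2
      if !p2.2.1 || p2.1.contains '$' || p2.1.contains ')' then false
      else
        let p3 := bPartition ')' p2.2.2
        p3.2.1 && !p3.1.contains '$' && !p3.1.contains '('

-- ===== PRECONDITION & SPEC =====
def Spec_check_substitution (item : String) (out : Bool) : Prop := out = check_substitution_alt item
instance (item : String) (out : Bool) : Decidable (Spec_check_substitution item out) := by unfold Spec_check_substitution; infer_instance

-- ===== CLAIM (what is proved, stated in full; the proofs are below) =====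
def Claim_equal_check_substitution : Prop := ∀ (item : String), Dom_check_substitution item → Spec_check_substitution item (check_substitution item)

-- ===== LEMMAS AND PROOFS =====

-- membership in syntax1, as a Bool
def pvP3 (c : Char) : Bool := aSyntax1.contains c

-- A-side characterisation: the loop returns true iff the first three $/(/) characters
-- (continuing the l1 accumulator) are $, (, ) in order, or two backticks (counting l2) occur.
lemma aLoop_eq (chars : List Char) : ∀ (l1 l2 : List Char), (l2 = [] ∨ l2 = ['`']) →
    aLoop chars l1 l2 =
      ((decide (l1.length < 3) &&
          ((l1 ++ (chars.filter pvP3).take (3 - l1.length)) == aSyntax1))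
        || decide (2 ≤ l2.length + (chars.filter (fun c => c == '`')).length)) := by
  induction chars with
  | nil =>
    intro l1 l2 h2
    have hne : ¬ (l1.length < 3 ∧ l1 = aSyntax1) := by
      rintro ⟨hlt, rfl⟩; simp [aSyntax1] at hlt
    rcases h2 with rfl | rfl <;>
      simp [aLoop, aSyntax1] at hne ⊢ <;> exact hne
  | cons c rest ih =>
    intro l1 l2 h2
    by_cases hc1 : c ∈ aSyntax1
    · have hcne : (c == '`') = false := by
        have : c = '$' ∨ c = '(' ∨ c = ')' := by simpa [aSyntax1] using hc1
        rcases this with rfl | rfl | rfl <;> rfl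
      have hc2f : ¬ c ∈ aSyntax2 := by
        have : c = '$' ∨ c = '(' ∨ c = ')' := by simpa [aSyntax1] using hc1
        rcases this with rfl | rfl | rfl <;> simp [aSyntax2]
      have hf1 : (c :: rest).filter pvP3 = c :: rest.filter pvP3 := by
        simp [pvP3, hc1]
      have hf2 : (c :: rest).filter (fun x => x == '`')
          = rest.filter (fun x => x == '`') := by
        simp [hcne]
      by_cases heq : l1 ++ [c] = aSyntax1
      · have hl1 : l1.length = 2 := by
          have := congrArg List.length heq
          simp [aSyntax1] at this; omega
        simp [aLoop, hc1, heq, hl1, hf1]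
      · have lhs : aLoop (c :: rest) l1 l2 = aLoop rest (l1 ++ [c]) l2 := by
          simp [aLoop, hc1, heq, hc2f]
        rw [lhs, ih (l1 ++ [c]) l2 h2, hf1, hf2]
        congr 1
        by_cases hlt : l1.length < 2
        · have h3 : 3 - l1.length = (3 - (l1.length + 1)) + 1 := by omega
          simp only [List.length_append, List.length_singleton, h3, List.take_succ_cons,
            List.append_assoc, List.singleton_append]
          have ha : l1.length + 1 < 3 := by omega
          have hb : l1.length < 3 := by omega
          simp [ha, hb]
        · by_cases hl2 : l1.length = 2
          · have h3 : 3 - l1.length = 1 := by omega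
            simp [hl2, List.take_succ_cons, heq]
          · have ha : ¬ l1.length < 3 := by omega
            simp [ha]
            exact fun h => absurd h (by omega)
    · by_cases hc2 : c ∈ aSyntax2
      · have hc : c = '`' := by simpa [aSyntax2] using hc2
        subst hc
        have hf1 : ('`' :: rest).filter pvP3 = rest.filter pvP3 := by
          simp [pvP3, hc1]
        have hf2 : ('`' :: rest).filter (fun x => x == '`')
            = '`' :: rest.filter (fun x => x == '`') := by
          simp
        rcases h2 with rfl | rfl
        · have lhs : aLoop ('`' :: rest) l1 [] = aLoop rest l1 ['`'] := by
            simp [aLoop, hc1, aSyntax2]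
          rw [lhs, ih l1 ['`'] (Or.inr rfl), hf1, hf2]
          congr 1
          simp only [List.length_cons, List.length_nil, decide_eq_decide]
          omega
        · have lhs2 : aLoop ('`' :: rest) l1 ['`'] = true := by
            simp [aLoop, hc1, aSyntax2]
          rw [lhs2, hf2]
          have hd : decide (2 ≤ (['`'] : List Char).length
              + ('`' :: rest.filter (fun x => x == '`')).length) = true := by
            simp only [List.length_cons, decide_eq_true_eq]
            omega
          rw [hd]; simp
      · have hcne : (c == '`') = false := by
          have : c ≠ '`' := by
            intro h; subst h; exact hc2 (by simp [aSyntax2])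
          simp [this]
        have lhs : aLoop (c :: rest) l1 l2 = aLoop rest l1 l2 := by
          simp [aLoop, hc1, hc2]
        rw [lhs, ih l1 l2 h2]
        simp [pvP3, hc1, hcne]

-- B-side stage lemmas: each partition stage computes a prefix condition of the filtered list.
lemma stage3 (t : List Char) :
    ((bPartition ')' t).2.1 && !(bPartition ')' t).1.contains '$'
        && !(bPartition ')' t).1.contains '(')
    = ((t.filter pvP3).take 1 == [')']) := by
  induction t with
  | nil => simp [bPartition]
  | cons x t ih =>
    by_cases hx : x = ')'
    · subst hx; simp [bPartition, pvP3, aSyntax1]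
    · by_cases hd : x = '$'
      · subst hd; simp [bPartition, pvP3, aSyntax1]
      · by_cases hp : x = '('
        · subst hp; simp [bPartition, pvP3, aSyntax1]
        · have hpart : bPartition ')' (x :: t)
              = (x :: (bPartition ')' t).1, (bPartition ')' t).2) := by
            simp [bPartition, hx]
          have hP : pvP3 x = false := by
            simp [pvP3, aSyntax1, hx, hd, hp]
          rw [hpart]
          simpa [hP, Ne.symm hd, Ne.symm hp] using ih

lemma stage2 (r : List Char) :
    (if !(bPartition '(' r).2.1 || (bPartition '(' r).1.contains '$'
          || (bPartition '(' r).1.contains ')' then false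
     else
       (bPartition ')' (bPartition '(' r).2.2).2.1
         && !(bPartition ')' (bPartition '(' r).2.2).1.contains '$'
         && !(bPartition ')' (bPartition '(' r).2.2).1.contains '(')
    = ((r.filter pvP3).take 2 == ['(', ')']) := by
  induction r with
  | nil => simp [bPartition]
  | cons x r ih =>
    by_cases hx : x = '('
    · subst hx
      have hpart : bPartition '(' ('(' :: r) = ([], true, r) := by
        simp [bPartition]
      rw [hpart]
      simp only [List.contains_nil, Bool.not_true, Bool.or_false,
        if_neg (by simp : ¬ (false = true))]
      rw [stage3 r]
      simp [pvP3, aSyntax1]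
    · by_cases hd : x = '$'
      · subst hd; simp [bPartition, pvP3, aSyntax1]
      · by_cases hp : x = ')'
        · subst hp; simp [bPartition, pvP3, aSyntax1]
        · have hpart : bPartition '(' (x :: r)
              = (x :: (bPartition '(' r).1, (bPartition '(' r).2) := by
            simp [bPartition, hx]
          have hP : pvP3 x = false := by
            simp [pvP3, aSyntax1, hx, hd, hp]
          rw [hpart]
          simpa [hP, Ne.symm hd, Ne.symm hp] using ih

lemma stage1 (l : List Char) :
    (if !(bPartition '$' l).2.1 || (bPartition '$' l).1.contains '('
          || (bPartition '$' l).1.contains ')' then false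
     else
       (if !(bPartition '(' (bPartition '$' l).2.2).2.1
             || (bPartition '(' (bPartition '$' l).2.2).1.contains '$'
             || (bPartition '(' (bPartition '$' l).2.2).1.contains ')' then false
        else
          (bPartition ')' (bPartition '(' (bPartition '$' l).2.2).2.2).2.1
            && !(bPartition ')' (bPartition '(' (bPartition '$' l).2.2).2.2).1.contains '$'
            && !(bPartition ')' (bPartition '(' (bPartition '$' l).2.2).2.2).1.contains '('))
    = ((l.filter pvP3).take 3 == ['$', '(', ')']) := by
  induction l with
  | nil => simp [bPartition]
  | cons x l ih =>
    by_cases hx : x = '$'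
    · subst hx
      have hpart : bPartition '$' ('$' :: l) = ([], true, l) := by
        simp [bPartition]
      rw [hpart]
      simp only [List.contains_nil, Bool.not_true, Bool.or_false,
        if_neg (by simp : ¬ (false = true))]
      rw [stage2 l]
      simp [pvP3, aSyntax1]
    · by_cases hd : x = '('
      · subst hd; simp [bPartition, pvP3, aSyntax1]
      · by_cases hp : x = ')'
        · subst hp; simp [bPartition, pvP3, aSyntax1]
        · have hpart : bPartition '$' (x :: l)
              = (x :: (bPartition '$' l).1, (bPartition '$' l).2) := by
            simp [bPartition, hx]
          have hP : pvP3 x = false := by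
            simp [pvP3, aSyntax1, hx, hd, hp]
          rw [hpart]
          simpa [hP, Ne.symm hd, Ne.symm hp] using ih

lemma count_eq (l : List Char) : l.count '`' = (l.filter (fun c => c == '`')).length := by
  simp [List.count_eq_length_filter]

-- ===== VERDICT (by name: the statement is the Claim_ definition above) =====
theorem check_substitution_spec : Claim_equal_check_substitution := by
  intro item _
  unfold Spec_check_substitution check_substitution check_substitution_alt
  rw [aLoop_eq item.toList [] [] (Or.inl rfl)]
  by_cases hcnt : 2 ≤ (item.toList.filter (fun c => c == '`')).length
  · have hc' : 2 ≤ item.toList.count '`' := by rw [count_eq]; exact hcnt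
    simp [hc', hcnt]
  · have hc' : ¬ 2 ≤ item.toList.count '`' := by rw [count_eq]; exact hcnt
    rw [if_neg hc']
    have := stage1 item.toList
    simp only [List.nil_append, List.length_nil] at *
    simpa [hcnt, aSyntax1] using this.symm
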